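-- pv_equiv track=rewrite | github.com/Liuuoo/auto-fish | fishing0.5.py | _ordered_available_rod_slots
-- ===== SOURCE A (Python) =====
-- def _normalize_int(value):
--     try:
--         return int(value or 0)
--     except (TypeError, ValueError):
--         return 0
--
-- def _ordered_available_rod_slots(slots, start_after=None):
--     ordered = list(range(1, 6))
--     if start_after in ordered:
--         index = ordered.index(start_after)
--         ordered = ordered[index + 1:] + ordered[:index + 1]
--     return [
--         slot for slot in ordered
--         if slot in slots and _normalize_int(slots[slot].get("currentDurability")) > 0
--     ]
-- ===== SOURCE B (Python) =====
-- def _normalize_int(value):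
--     try:
--         return int(value or 0)
--     except (TypeError, ValueError):
--         return 0
--
--
-- def _ordered_available_rod_slots(slots, start_after=None):
--     # Sort the surviving slots by their cyclic distance from the pivot instead of
--     # slicing/rotating a list: slot start_after+1 gets key 0, ..., start_after gets key 4.
--     pivot = start_after if start_after in (1, 2, 3, 4, 5) else 5
--     return sorted(
--         (slot for slot in range(1, 6)
--          if slot in slots and _normalize_int(slots[slot].get("currentDurability")) > 0),
--         key=lambda slot: (slot - pivot - 1) % 5,
--     )
-- ===== Notes on version B (the rewrite author's own statement) =====
-- stated objective: alternative
-- what changed: B replaces A's slice-based rotation of the full range before filtering with a keyed sort: it sorts the surviving slots by their cyclic distance (slot - pivot - 1) % 5 from the pivot.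
import Mathlib
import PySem

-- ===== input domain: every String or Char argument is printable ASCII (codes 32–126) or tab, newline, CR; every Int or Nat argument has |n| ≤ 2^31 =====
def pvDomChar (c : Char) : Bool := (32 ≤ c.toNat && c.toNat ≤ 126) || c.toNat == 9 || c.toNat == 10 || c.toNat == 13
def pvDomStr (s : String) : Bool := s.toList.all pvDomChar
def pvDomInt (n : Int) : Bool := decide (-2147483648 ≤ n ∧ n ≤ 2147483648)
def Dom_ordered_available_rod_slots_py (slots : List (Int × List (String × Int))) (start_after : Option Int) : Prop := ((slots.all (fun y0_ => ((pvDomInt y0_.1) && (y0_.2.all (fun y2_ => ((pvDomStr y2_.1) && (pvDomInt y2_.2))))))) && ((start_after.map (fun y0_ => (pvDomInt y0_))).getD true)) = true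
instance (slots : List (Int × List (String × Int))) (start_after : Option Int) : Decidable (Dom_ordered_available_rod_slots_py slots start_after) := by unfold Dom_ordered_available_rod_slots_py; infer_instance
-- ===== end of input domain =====

-- B orders the surviving slots by SORTING them on the cyclic distance (slot - pivot - 1) % 5
-- from the pivot instead of A's rotate-the-whole-range-by-slicing-then-filter (alternative algorithm, same cost).


-- ===== PORT A =====
-- shared with Python: _normalize_int(value) for value : Option Int  (int(value or 0); exact for int/None inputs)
def pvNormInt (v : Option Int) : Int :=
  match v with
  | none => 0
  | some x => if x = 0 then 0 else x

-- the comprehension test `slot in slots and _normalize_int(slots[slot].get("currentDurability")) > 0`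
-- (dict lookup = first match in the association list); both Pythons use this same condition verbatim
def pvAvail (slots : List (Int × List (String × Int))) (slot : Int) : Bool :=
  match slots.find? (fun kv => kv.1 == slot) with
  | none => false
  | some kv => decide (pvNormInt ((kv.2.find? (fun e => e.1 == "currentDurability")).map (·.2)) > 0)

def ordered_available_rod_slots_py (slots : List (Int × List (String × Int))) (start_after : Option Int) : List Int :=
  let ordered := PySem.List.pyRange 1 6 1
  let ordered :=
    match start_after with
    | none => ordered         -- None is not in [1..5]
    | some k =>
      if ordered.contains k then
        match PySem.List.index? ordered k with
        | some idx =>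
            PySem.List.slice ordered (some ((idx : Int) + 1)) none ++
            PySem.List.slice ordered none (some ((idx : Int) + 1))
        | none => ordered     -- unreachable: k ∈ ordered
      else ordered
  ordered.filter (pvAvail slots)

-- ===== PORT B =====
def ordered_available_rod_slots_py_alt (slots : List (Int × List (String × Int))) (start_after : Option Int) : List Int :=
  let pivot : Int :=
    match start_after with
    | some k => if k = 1 ∨ k = 2 ∨ k = 3 ∨ k = 4 ∨ k = 5 then k else 5
    | none => 5
  PySem.List.sorted ((PySem.List.pyRange 1 6 1).filter (pvAvail slots))
    (fun slot => PySem.Int.mod (slot - pivot - 1) 5) false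

-- ===== PRECONDITION & SPEC =====
def Spec_ordered_available_rod_slots_py (slots : List (Int × List (String × Int))) (start_after : Option Int) (out : List Int) : Prop := out = ordered_available_rod_slots_py_alt slots start_after
instance (slots : List (Int × List (String × Int))) (start_after : Option Int) (out : List Int) : Decidable (Spec_ordered_available_rod_slots_py slots start_after out) := by unfold Spec_ordered_available_rod_slots_py; infer_instance

-- ===== CLAIM (what is proved, stated in full; the proofs are below) =====
def Claim_equal_ordered_available_rod_slots_py : Prop := ∀ (slots : List (Int × List (String × Int))) (start_after : Option Int), Dom_ordered_available_rod_slots_py slots start_after → Spec_ordered_available_rod_slots_py slots start_after (ordered_available_rod_slots_py slots start_after)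

-- ===== LEMMAS AND PROOFS =====
theorem pyRange16 : PySem.List.pyRange 1 6 1 = [1, 2, 3, 4, 5] := by decide

-- the rotated range A builds (closed once k is fixed; definitionally the term inside port A)
def rotAux (k : Int) : List Int :=
  match PySem.List.index? [(1 : Int), 2, 3, 4, 5] k with
  | some idx =>
      PySem.List.slice [(1 : Int), 2, 3, 4, 5] (some ((idx : Int) + 1)) none ++
      PySem.List.slice [(1 : Int), 2, 3, 4, 5] none (some ((idx : Int) + 1))
  | none => [(1 : Int), 2, 3, 4, 5]

-- for each pivot in 1..5 and each profile of the availability test, A's rotated filter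
-- equals B's sort by cyclic distance (both sides close to literals once f's values are fixed)
theorem rot_eq_sort (f : Int → Bool) (k : Int) (hlo : 1 ≤ k) (hhi : k ≤ 5) :
    (rotAux k).filter f
    = PySem.List.sorted (([(1 : Int), 2, 3, 4, 5]).filter f)
        (fun slot => PySem.Int.mod (slot - k - 1) 5) false := by
  interval_cases k
  · rw [show rotAux 1 = [2, 3, 4, 5, 1] from by decide]
    cases h1 : f 1 <;> cases h2 : f 2 <;> cases h3 : f 3 <;> cases h4 : f 4 <;> cases h5 : f 5 <;>
      simp only [List.filter, h1, h2, h3, h4, h5] <;> decide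
  · rw [show rotAux 2 = [3, 4, 5, 1, 2] from by decide]
    cases h1 : f 1 <;> cases h2 : f 2 <;> cases h3 : f 3 <;> cases h4 : f 4 <;> cases h5 : f 5 <;>
      simp only [List.filter, h1, h2, h3, h4, h5] <;> decide
  · rw [show rotAux 3 = [4, 5, 1, 2, 3] from by decide]
    cases h1 : f 1 <;> cases h2 : f 2 <;> cases h3 : f 3 <;> cases h4 : f 4 <;> cases h5 : f 5 <;>
      simp only [List.filter, h1, h2, h3, h4, h5] <;> decide
  · rw [show rotAux 4 = [5, 1, 2, 3, 4] from by decide]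
    cases h1 : f 1 <;> cases h2 : f 2 <;> cases h3 : f 3 <;> cases h4 : f 4 <;> cases h5 : f 5 <;>
      simp only [List.filter, h1, h2, h3, h4, h5] <;> decide
  · rw [show rotAux 5 = [1, 2, 3, 4, 5] from by decide]
    cases h1 : f 1 <;> cases h2 : f 2 <;> cases h3 : f 3 <;> cases h4 : f 4 <;> cases h5 : f 5 <;>
      simp only [List.filter, h1, h2, h3, h4, h5] <;> decide

theorem sort_natural (f : Int → Bool) :
    PySem.List.sorted (([(1 : Int), 2, 3, 4, 5]).filter f)
        (fun slot => PySem.Int.mod (slot - 5 - 1) 5) false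
    = ([(1 : Int), 2, 3, 4, 5]).filter f := by
  cases h1 : f 1 <;> cases h2 : f 2 <;> cases h3 : f 3 <;> cases h4 : f 4 <;> cases h5 : f 5 <;>
    simp only [List.filter, h1, h2, h3, h4, h5] <;> decide

-- ===== VERDICT (by name: the statement is the Claim_ definition above) =====
theorem ordered_available_rod_slots_py_spec : Claim_equal_ordered_available_rod_slots_py := by
  intro slots sa _
  unfold Spec_ordered_available_rod_slots_py
  unfold ordered_available_rod_slots_py ordered_available_rod_slots_py_alt
  rw [pyRange16]
  cases sa with
  | none => exact (sort_natural (pvAvail slots)).symm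
  | some k =>
      simp only
      by_cases hk : k = 1 ∨ k = 2 ∨ k = 3 ∨ k = 4 ∨ k = 5
      · have hc : ([(1 : Int), 2, 3, 4, 5]).contains k = true := by
          simp only [List.contains_eq_mem, List.mem_cons, List.not_mem_nil, or_false,
            decide_eq_true_eq]
          omega
        rw [if_pos hc, if_pos hk]
        exact rot_eq_sort (pvAvail slots) k (by omega) (by omega)
      · have hc' : ¬(([(1 : Int), 2, 3, 4, 5]).contains k = true) := by
          simp only [List.contains_eq_mem, List.mem_cons, List.not_mem_nil, or_false,
            decide_eq_true_eq]
          omega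
        rw [if_neg hc', if_neg hk]
        exact (sort_natural (pvAvail slots)).symm
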